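-- pv_equiv track=rewrite | github.com/trueSnevar/algos_data_structures | sprint_3/sprint_3_E.py | buy_houses
-- ===== SOURCE A (Python) =====
-- from typing import List
--
-- def buy_houses(money: int, prices: List[int]) -> int:
--     prices.sort()
--     counter = 0
--     while money >= 0:
--         for price in prices:
--             diff = money - price
--             if diff >= 0:
--                 counter += 1
--             money -= price
--     return counter
-- ===== SOURCE B (Python) =====
-- def buy_houses(money, prices):
--     # Closed form: sort once, prefix sums, then arithmetic for the number of
--     # full cycles each prefix survives -- no simulation of passes.
--     if money < 0:
--         return 0
--     ps = sorted(prices)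
--     prefixes = []
--     t = 0
--     for p in ps:
--         t += p
--         prefixes.append(t)
--     s = t  # total cost of one full pass (Pre_ guarantees s > 0 here)
--     k = money // s + 1  # number of full passes the simulation performs
--     total = 0
--     for q in prefixes:
--         if money >= q:
--             total += min(k, (money - q) // s + 1)
--     return total
-- ===== Notes on version B (the rewrite author's own statement) =====
-- stated objective: alternative
-- what changed: Replaces the pass-by-pass simulation of the buying cycle with sort + prefix sums + a per-prefix floor-division formula counting how many full passes each prefix survives.
import Mathlib
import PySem

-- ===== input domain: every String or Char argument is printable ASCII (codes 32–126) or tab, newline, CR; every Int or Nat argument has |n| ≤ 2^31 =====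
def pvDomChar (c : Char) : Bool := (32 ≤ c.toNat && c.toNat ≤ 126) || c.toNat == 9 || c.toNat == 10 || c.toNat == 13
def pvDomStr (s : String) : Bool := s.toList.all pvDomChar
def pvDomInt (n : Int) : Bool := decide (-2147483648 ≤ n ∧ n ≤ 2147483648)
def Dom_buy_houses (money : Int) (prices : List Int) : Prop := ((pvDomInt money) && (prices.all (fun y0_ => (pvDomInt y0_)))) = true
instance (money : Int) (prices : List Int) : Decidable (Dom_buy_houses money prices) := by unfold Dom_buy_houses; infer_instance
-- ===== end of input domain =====

-- B replaces the pass-by-pass simulation with sort + prefix sums + a floor-division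
-- count of full passes per prefix, with no simulation of passes. A sorts `prices` in place;
-- B does not mutate its argument: the equivalence proved here is about the return value.

-- ===== PORT A =====
-- inner 'for price in prices' loop body: state = (counter, money)
def buyStepA (st : Int × Int) (price : Int) : Int × Int :=
  (if st.2 - price ≥ 0 then st.1 + 1 else st.1, st.2 - price)

-- the 'while money >= 0' loop, with fuel making the recursion total (the fuel chosen
-- below is sufficient on every input admitted by Pre_, so the value is A's value there)
def buyLoopA (ps : List Int) : Nat → Int → Int → Int
  | 0, _, counter => counter
  | fuel + 1, money, counter =>
      if money ≥ 0 then
        let st := ps.foldl buyStepA (counter, money)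
        buyLoopA ps fuel st.2 st.1
      else counter

def buy_houses (money : Int) (prices : List Int) : Int :=
  let ps := PySem.List.sorted prices (fun x => x)
  let s := ps.sum
  let fuel := if 0 < s ∧ 0 ≤ money then ((PySem.Int.floordiv money s).toNat + 2) else 1
  buyLoopA ps fuel money 0

-- ===== PORT B =====
-- prefix sums of ps with running total t (Source B's 'prefixes' loop)
def buyPrefixes : List Int → Int → List Int
  | [], _ => []
  | p :: rest, t => (t + p) :: buyPrefixes rest (t + p)

def buy_houses_alt (money : Int) (prices : List Int) : Int :=
  if money < 0 then 0
  else
    let ps := PySem.List.sorted prices (fun x => x)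
    let pre := buyPrefixes ps 0
    let s := ps.sum
    let k := PySem.Int.floordiv money s + 1
    pre.foldl
      (fun total q =>
        if money ≥ q then total + min k (PySem.Int.floordiv (money - q) s + 1)
        else total) 0

-- ===== PRECONDITION & SPEC =====
-- Pre_ excludes exactly the inputs on which A's while-loop never terminates (A returns
-- no value there): money ≥ 0 with a non-positive total pass cost sum(prices).
def Pre_buy_houses (money : Int) (prices : List Int) : Prop :=
  money < 0 ∨ 0 < prices.sum
instance (money : Int) (prices : List Int) : Decidable (Pre_buy_houses money prices) := by
  unfold Pre_buy_houses; infer_instance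

def pvWitness_buy_houses : Int × List Int := (10, [2, 3])

def Spec_buy_houses (money : Int) (prices : List Int) (out : Int) : Prop := out = buy_houses_alt money prices
instance (money : Int) (prices : List Int) (out : Int) : Decidable (Spec_buy_houses money prices out) := by unfold Spec_buy_houses; infer_instance

-- ===== CLAIM (what is proved, stated in full; the proofs are below) =====
def Claim_equal_buy_houses : Prop := ∀ (money : Int) (prices : List Int), Dom_buy_houses money prices → Pre_buy_houses money prices → Spec_buy_houses money prices (buy_houses money prices)

-- ===== LEMMAS AND PROOFS =====

-- B's per-prefix count, written with ediv (0 < s throughout)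
def buyCnt (m s q : Int) : Int := if m ≥ q then min (m / s + 1) ((m - q) / s + 1) else 0

-- indicator "prefix q is affordable in a pass starting at m"
def buyInd (m q : Int) : Int := if q ≤ m then 1 else 0

-- B's value as a function of the remaining money (proof-side characterisation)
def buyVal (pre : List Int) (s m : Int) : Int :=
  if m < 0 then 0 else (pre.map (buyCnt m s)).sum

theorem buyPrefixes_shift (ps : List Int) : ∀ t : Int, buyPrefixes ps t = (buyPrefixes ps 0).map (· + t) := by
  induction ps with
  | nil => intro t; simp [buyPrefixes]
  | cons p r ih =>
      intro t
      simp only [buyPrefixes, ih (t + p), ih (0 + p), List.map_cons, List.map_map]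
      refine congrArg₂ List.cons (by ring) ?_
      exact List.map_congr_left (fun q _ => by simp [Function.comp]; ring)

theorem sum_map_add (l : List Int) (f g : Int → Int) :
    (l.map (fun x => f x + g x)).sum = (l.map f).sum + (l.map g).sum := by
  induction l with
  | nil => simp
  | cons p r ih => simp [ih]; ring

-- the inner for-loop over prices, characterised by the prefix sums
theorem innerA (ps : List Int) : ∀ c m : Int,
    ps.foldl buyStepA (c, m) = (c + ((buyPrefixes ps 0).map (buyInd m)).sum, m - ps.sum) := by
  induction ps with
  | nil => intro c m; simp [buyPrefixes]
  | cons p r ih =>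
      intro c m
      have h1 : List.foldl buyStepA (c, m) (p :: r)
          = List.foldl buyStepA ((if m - p ≥ 0 then c + 1 else c), m - p) r := by
        simp [List.foldl, buyStepA]
      rw [h1, ih]
      have h2 : buyPrefixes (p :: r) 0 = p :: (buyPrefixes r 0).map (· + p) := by
        simp [buyPrefixes, buyPrefixes_shift r p]
      rw [h2]
      have h3 : ((buyPrefixes r 0).map (· + p)).map (buyInd m)
          = (buyPrefixes r 0).map (buyInd (m - p)) := by
        rw [List.map_map]
        exact List.map_congr_left (fun q _ => by
          simp [Function.comp, buyInd]; split_ifs <;> omega)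
      simp only [List.map_cons, List.sum_cons, h3, Prod.mk.injEq]
      have hb : buyInd m p = if m - p ≥ 0 then 1 else 0 := by
        simp only [buyInd]; split_ifs <;> omega
      refine ⟨?_, by ring⟩
      rw [hb]; split_ifs with h <;> ring

-- one pass of the closed form: peel off the pass starting at m (0 ≤ m, 0 < s)
theorem buyVal_rec (pre : List Int) (s m : Int) (hs : 0 < s) (hm : 0 ≤ m) :
    buyVal pre s m = (pre.map (buyInd m)).sum + buyVal pre s (m - s) := by
  have hsub : (m - s) / s = m / s - 1 := by
    have := Int.add_mul_ediv_right m (-1) (by omega : s ≠ 0)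
    simpa [sub_eq_add_neg, neg_mul] using this
  by_cases hneg : m - s < 0
  · -- last pass: m/s = 0, every affordable prefix is counted exactly once
    have hms : m / s = 0 := Int.ediv_eq_zero_of_lt hm (by omega)
    simp only [buyVal, if_neg (by omega : ¬ m < 0), if_pos hneg, add_zero]
    refine congrArg List.sum (List.map_congr_left (fun q _ => ?_))
    simp only [buyCnt, buyInd, hms]
    split_ifs with h1 <;> try omega
    have hd : 0 ≤ (m - q) / s := Int.ediv_nonneg (by omega) (by omega)
    omega
  · rw [not_lt] at hneg
    simp only [buyVal, if_neg (by omega : ¬ m < 0), if_neg (by omega : ¬ m - s < 0)]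
    rw [← sum_map_add]
    refine congrArg List.sum (List.map_congr_left (fun q _ => ?_))
    simp only [buyCnt, buyInd, hsub]
    have hsub2 : (m - s - q) / s = (m - q) / s - 1 := by
      have := Int.add_mul_ediv_right (m - q) (-1) (by omega : s ≠ 0)
      have h' : m - s - q = m - q + -1 * s := by ring
      rw [h', this]; ring
    rw [hsub2]
    have hK : 1 ≤ m / s := by rw [Int.le_ediv_iff_mul_le hs]; omega
    by_cases h1 : q ≤ m - s
    · have hd1 : 1 ≤ (m - q) / s := by rw [Int.le_ediv_iff_mul_le hs]; omega
      split_ifs <;> omega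
    · by_cases h2 : q ≤ m
      · have hd0 : (m - q) / s = 0 := Int.ediv_eq_zero_of_lt (by omega) (by omega)
        split_ifs <;> omega
      · split_ifs <;> omega

-- B's fold in map/sum normal form
theorem foldB (m s k : Int) (hk : k = m / s + 1) : ∀ (pre : List Int) (a : Int),
    pre.foldl (fun total q => if m ≥ q then total + min k ((m - q) / s + 1) else total) a
      = a + (pre.map (buyCnt m s)).sum := by
  intro pre
  induction pre with
  | nil => intro a; simp
  | cons q r ih =>
      intro a
      simp only [List.foldl, List.map, List.sum_cons, ih]
      simp only [buyCnt, hk]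
      split_ifs with h
      · ring
      · ring

-- the outer while-loop equals the closed form, given enough fuel
theorem loopA_eq (ps : List Int) (hs : 0 < ps.sum) : ∀ (fuel : Nat) (m c : Int),
    (if 0 ≤ m then (m / ps.sum).toNat + 2 ≤ fuel else 1 ≤ fuel) →
    buyLoopA ps fuel m c = c + buyVal (buyPrefixes ps 0) ps.sum m := by
  intro fuel
  induction fuel with
  | zero => intro m c h; split_ifs at h <;> omega
  | succ f ih =>
      intro m c h
      by_cases hm : 0 ≤ m
      · rw [if_pos hm] at h
        have hK0 : 0 ≤ m / ps.sum := Int.ediv_nonneg hm (by omega)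
        simp only [buyLoopA, if_pos (by omega : m ≥ 0), innerA ps c m]
        rw [ih (m - ps.sum) _ ?_]
        · rw [buyVal_rec _ _ _ hs hm]; ring
        · have hsub : (m - ps.sum) / ps.sum = m / ps.sum - 1 := by
            have := Int.add_mul_ediv_right m (-1) (by omega : ps.sum ≠ 0)
            simpa [sub_eq_add_neg, neg_mul] using this
          by_cases h2 : 0 ≤ m - ps.sum
          · rw [if_pos h2, hsub]
            have hK1 : 1 ≤ m / ps.sum := by rw [Int.le_ediv_iff_mul_le hs]; omega
            omega
          · rw [if_neg h2]; omega
      · simp only [buyLoopA, if_neg (by omega : ¬ m ≥ 0)]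
        simp [buyVal, if_pos (by omega : m < 0)]

-- ===== VERDICT (by name: the statement is the Claim_ definition above) =====
theorem buy_houses_spec : Claim_equal_buy_houses := by
  intro money prices _ hpre
  unfold Spec_buy_houses buy_houses buy_houses_alt
  have hsum : (PySem.List.sorted prices (fun x => x)).sum = prices.sum :=
    (PySem.List.sorted_perm prices (fun x => x) false).sum_eq
  by_cases hm : money < 0
  · rw [if_pos hm]
    have : ¬ (0 < (PySem.List.sorted prices (fun x => x)).sum ∧ 0 ≤ money) := by omega
    simp only [this, if_false]
    simp [buyLoopA, if_neg (by omega : ¬ money ≥ 0)]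
  · have hs : 0 < prices.sum := by rcases hpre with h | h; omega; exact h
    have hs' : 0 < (PySem.List.sorted prices (fun x => x)).sum := by rw [hsum]; exact hs
    rw [if_neg hm]
    have hcond : (0 < (PySem.List.sorted prices (fun x => x)).sum ∧ 0 ≤ money) := ⟨hs', by omega⟩
    simp only [if_pos hcond, PySem.Int.floordiv_eq_ediv_of_pos hs']
    rw [loopA_eq _ hs' _ money 0 (by rw [if_pos (by omega : (0:Int) ≤ money)])]
    rw [foldB money (PySem.List.sorted prices (fun x => x)).sum _ rfl]
    simp [buyVal, if_neg hm]
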